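-- pv_equiv track=rewrite | github.com/QUSETIONS/MiniCode-Python | minicode/config.py | _suggest_model_name
-- ===== SOURCE A (Python) =====
-- KNOWN_MODELS = [
--     "claude-sonnet-4-20250514",
--     "claude-opus-4-20250514",
--     "claude-haiku-3-20240307",
--     "gpt-4o",
--     "gpt-4o-mini",
--     "gpt-4-turbo",
--     "o1",
--     "o1-mini",
--     "o3-mini",
--     # OpenRouter popular models
--     "openrouter/auto",
--     "anthropic/claude-sonnet-4",
--     "anthropic/claude-opus-4",
--     "openai/gpt-4o",
--     "openai/gpt-4o-mini",
--     "google/gemini-2.5-pro",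
--     "google/gemini-2.5-flash",
--     "meta-llama/llama-4-maverick",
--     "deepseek/deepseek-r1",
--     "deepseek/deepseek-chat",
--     "qwen/qwen3-235b-a22b",
--     "minimax/minimax-m1",
-- ]
--
-- def _suggest_model_name(typed: str) -> str:
--     """根据输入建议最接近的合法模型名称"""
--     if not typed:
--         return ""
--
--     # 简单的前缀匹配
--     for model in KNOWN_MODELS:
--         if model.startswith(typed.lower()):
--             return model
--
--     # 模糊匹配：包含输入字符的模型
--     for model in KNOWN_MODELS:
--         if typed.lower() in model:
--             return model
--
--     return ""
-- ===== SOURCE B (Python) =====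
-- KNOWN_MODELS = [
--     "claude-sonnet-4-20250514",
--     "claude-opus-4-20250514",
--     "claude-haiku-3-20240307",
--     "gpt-4o",
--     "gpt-4o-mini",
--     "gpt-4-turbo",
--     "o1",
--     "o1-mini",
--     "o3-mini",
--     "openrouter/auto",
--     "anthropic/claude-sonnet-4",
--     "anthropic/claude-opus-4",
--     "openai/gpt-4o",
--     "openai/gpt-4o-mini",
--     "google/gemini-2.5-pro",
--     "google/gemini-2.5-flash",
--     "meta-llama/llama-4-maverick",
--     "deepseek/deepseek-r1",
--     "deepseek/deepseek-chat",
--     "qwen/qwen3-235b-a22b",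
--     "minimax/minimax-m1",
-- ]
--
-- def _suggest_model_name(typed: str) -> str:
--     """Single pass: return first prefix match eagerly; remember first substring match as fallback."""
--     if not typed:
--         return ""
--     q = typed.lower()
--     fallback = None
--     for model in KNOWN_MODELS:
--         if model.startswith(q):
--             return model
--         if fallback is None and q in model:
--             fallback = model
--     return fallback if fallback is not None else ""
-- ===== Notes on version B (the rewrite author's own statement) =====
-- stated objective: faster
-- what changed: Replaced A's two sequential scans of KNOWN_MODELS (prefix pass, then substring pass) by a single pass that returns eagerly on the first prefix match while recording the first substring match in a fallback variable, with the lowercased query computed once instead of per iteration.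
import Mathlib
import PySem

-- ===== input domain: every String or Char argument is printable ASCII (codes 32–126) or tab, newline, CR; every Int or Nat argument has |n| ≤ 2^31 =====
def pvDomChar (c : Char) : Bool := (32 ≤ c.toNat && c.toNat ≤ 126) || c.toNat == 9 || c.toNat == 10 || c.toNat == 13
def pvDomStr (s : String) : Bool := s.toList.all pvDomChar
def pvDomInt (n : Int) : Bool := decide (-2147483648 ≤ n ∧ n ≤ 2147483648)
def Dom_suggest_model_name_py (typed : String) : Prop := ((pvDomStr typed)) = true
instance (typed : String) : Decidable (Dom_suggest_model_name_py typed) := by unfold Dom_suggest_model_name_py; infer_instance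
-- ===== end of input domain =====

-- B changes: one pass with an eager prefix return and a first-substring fallback instead of A's two scans (objective: simpler).

def KNOWN_MODELS : List String := [
  "claude-sonnet-4-20250514",
  "claude-opus-4-20250514",
  "claude-haiku-3-20240307",
  "gpt-4o",
  "gpt-4o-mini",
  "gpt-4-turbo",
  "o1",
  "o1-mini",
  "o3-mini",
  "openrouter/auto",
  "anthropic/claude-sonnet-4",
  "anthropic/claude-opus-4",
  "openai/gpt-4o",
  "openai/gpt-4o-mini",
  "google/gemini-2.5-pro",
  "google/gemini-2.5-flash",
  "meta-llama/llama-4-maverick",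
  "deepseek/deepseek-r1",
  "deepseek/deepseek-chat",
  "qwen/qwen3-235b-a22b",
  "minimax/minimax-m1"]

-- ===== PORT A =====
-- first loop: 'for model in KNOWN_MODELS: if model.startswith(typed.lower()): return model'
def pvALoop1 (q : String) : List String → Option String
  | [] => none
  | m :: rest => if PySem.Str.startswith m q then some m else pvALoop1 q rest

-- second loop: 'for model in KNOWN_MODELS: if typed.lower() in model: return model'
def pvALoop2 (q : String) : List String → Option String
  | [] => none
  | m :: rest => if PySem.Str.isIn q m then some m else pvALoop2 q rest

def suggest_model_name_py (typed : String) : String :=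
  if typed.toList = [] then ""   -- 'if not typed'
  else
    match pvALoop1 (PySem.Str.lower typed) KNOWN_MODELS with
    | some m => m
    | none =>
      match pvALoop2 (PySem.Str.lower typed) KNOWN_MODELS with
      | some m => m
      | none => ""

-- ===== PORT B =====
-- single loop carrying the fallback: return on prefix match, record first substring match
def pvBLoop (q : String) : List String → Option String → String
  | [], fallback => match fallback with | some f => f | none => ""
  | m :: rest, fallback =>
    if PySem.Str.startswith m q then m
    else pvBLoop q rest
      (match fallback with
       | some f => some f
       | none => if PySem.Str.isIn q m then some m else none)

def suggest_model_name_py_alt (typed : String) : String :=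
  if typed.toList = [] then ""
  else pvBLoop (PySem.Str.lower typed) KNOWN_MODELS none

-- ===== PRECONDITION & SPEC =====
def Spec_suggest_model_name_py (typed : String) (out : String) : Prop := out = suggest_model_name_py_alt typed
instance (typed : String) (out : String) : Decidable (Spec_suggest_model_name_py typed out) := by unfold Spec_suggest_model_name_py; infer_instance

-- ===== CLAIM (what is proved, stated in full; the proofs are below) =====
def Claim_equal_suggest_model_name_py : Prop := ∀ (typed : String), Dom_suggest_model_name_py typed → Spec_suggest_model_name_py typed (suggest_model_name_py typed)

-- ===== LEMMAS AND PROOFS =====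
-- loop invariant: B's single pass equals A's two passes with the carried fallback spliced in
theorem pvBLoop_eq (q : String) (l : List String) (fb : Option String) :
    pvBLoop q l fb =
      match pvALoop1 q l with
      | some m => m
      | none =>
        match fb with
        | some f => f
        | none => match pvALoop2 q l with | some m => m | none => "" := by
  induction l generalizing fb with
  | nil => cases fb <;> simp [pvBLoop, pvALoop1, pvALoop2]
  | cons m rest ih =>
    by_cases hp : PySem.Chars.startswith m.toList q.toList
    · simp [pvBLoop, pvALoop1, hp]
    · by_cases hs : PySem.Chars.isIn q.toList m.toList <;> cases fb <;>
        simp [pvBLoop, pvALoop1, pvALoop2, hp, hs, ih]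

-- ===== VERDICT (by name: the statement is the Claim_ definition above) =====
theorem suggest_model_name_py_spec : Claim_equal_suggest_model_name_py := by
  intro typed _
  unfold Spec_suggest_model_name_py suggest_model_name_py suggest_model_name_py_alt
  by_cases h : typed.toList = []
  · simp [h]
  · simp only [h, if_false, pvBLoop_eq]
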